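-- pv_equiv track=rewrite | github.com/milu-buet/google-code-jam | ICPC World Final 2017/C. Mission Inprobable/solution.py | getMaxElementsRows
-- ===== SOURCE A (Python) =====
-- def getMaxElementsRows(r,c,rows):
-- 	max_rows = {}
-- 	for i in range(r):
-- 		max_rows[i] = [0,]
-- 		for j in range(1,c):
-- 			if rows[i][max_rows[i][0]] < rows[i][j]:
-- 				max_rows[i] = [j,]
-- 			elif rows[i][max_rows[i][0]] == rows[i][j]:
-- 				max_rows[i].append(j)
--
-- 	return max_rows
-- ===== SOURCE B (Python) =====
-- def getMaxElementsRows(r, c, rows):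
--     def peaks(row):
--         m = max(row[j] for j in range(c))
--         return [j for j in range(c) if row[j] == m]
--     return {i: peaks(rows[i]) for i in range(r)}
-- ===== Notes on version B (the rewrite author's own statement) =====
-- stated objective: simpler
-- what changed: A's fused incremental scan that maintains a candidate index list (resetting it on a new maximum, re-reading the row at its head) is replaced by a dict comprehension over a per-row helper that first computes the row maximum with max() and then collects the indices equal to it.
-- outside the precondition, e.g. on getMaxElementsRows(2, 0, []): A returns {0: [0], 1: [0]}, B raises IndexError; on getMaxElementsRows(1, 1, [[]]): A returns {0: [0]}, B raises IndexError; on getMaxElementsRows(1, -1, [[3, 1]]): A returns {0: [0]}, B raises ValueError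
import Mathlib
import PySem

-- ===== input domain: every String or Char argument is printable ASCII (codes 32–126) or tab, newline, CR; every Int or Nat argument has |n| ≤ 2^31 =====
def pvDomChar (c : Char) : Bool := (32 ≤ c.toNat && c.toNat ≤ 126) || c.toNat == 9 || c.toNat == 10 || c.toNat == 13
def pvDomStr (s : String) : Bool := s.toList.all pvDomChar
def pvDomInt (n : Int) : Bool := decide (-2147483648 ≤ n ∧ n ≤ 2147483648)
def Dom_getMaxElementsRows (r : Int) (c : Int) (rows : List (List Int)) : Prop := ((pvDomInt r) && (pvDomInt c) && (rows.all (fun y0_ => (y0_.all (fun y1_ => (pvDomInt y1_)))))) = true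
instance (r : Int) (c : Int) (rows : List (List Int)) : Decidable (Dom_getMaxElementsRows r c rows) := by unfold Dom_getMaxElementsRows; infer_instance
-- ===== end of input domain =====

-- B replaces A's fused candidate-list scan by a dict comprehension over a per-row helper: row maximum via max(), then index collection; return-value equivalence on Pre_.

-- ===== PORT A =====
-- A's inner j-loop: the running candidate index list, re-reading the row at its head.
-- pyGetD is exact here: Pre_ keeps every index in range.
def innerA (row : List Int) (c : Int) : List Int :=
  (PySem.List.pyRange 1 c 1).foldl (fun cur j =>
    if PySem.List.pyGetD row (cur.headD 0) 0 < PySem.List.pyGetD row j 0 then [j]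
    else if PySem.List.pyGetD row (cur.headD 0) 0 == PySem.List.pyGetD row j 0 then cur ++ [j]
    else cur) [0]

def getMaxElementsRows (r : Int) (c : Int) (rows : List (List Int)) : List (Int × List Int) :=
  (PySem.List.pyRange 0 r 1).foldl (fun acc i =>
    acc ++ [(i, innerA (PySem.List.pyGetD rows i []) c)]) []

-- ===== PORT B =====
-- B's `peaks` helper: max() over the first c entries, then the indices equal to it.
def rowB (row : List Int) (c : Int) : List Int :=
  let vals := (PySem.List.pyRange 0 c 1).map (fun j => PySem.List.pyGetD row j 0)
  let m := (PySem.List.max? vals (fun x => x)).getD 0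
  (PySem.List.pyRange 0 c 1).filter (fun j => PySem.List.pyGetD row j 0 == m)

-- the dict comprehension {i: peaks(rows[i]) for i in range(r)} (keys distinct)
def getMaxElementsRows_alt (r : Int) (c : Int) (rows : List (List Int)) : List (Int × List Int) :=
  (PySem.List.pyRange 0 r 1).map (fun i => (i, rowB (PySem.List.pyGetD rows i []) c))

-- ===== PRECONDITION & SPEC =====
-- Pre_ excludes inputs with r ≥ 1 where c ≤ 0, or where some of the first r rows is missing (r > len(rows))
-- or has fewer than c entries yet A never reads it (c ≤ 1): there A returns the sentinel index list [0]
-- per row without reading any data, while B's max()-based helper raises.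
def Pre_getMaxElementsRows (r : Int) (c : Int) (rows : List (List Int)) : Prop :=
  r ≤ 0 ∨ (1 ≤ c ∧ r ≤ (rows.length : Int) ∧ ∀ row ∈ rows.take r.toNat, c ≤ (row.length : Int))
instance (r : Int) (c : Int) (rows : List (List Int)) : Decidable (Pre_getMaxElementsRows r c rows) := by
  unfold Pre_getMaxElementsRows; infer_instance

def pvWitness_getMaxElementsRows : Int × Int × List (List Int) := (2, 2, [[1, 1], [0, 2]])

def Spec_getMaxElementsRows (r : Int) (c : Int) (rows : List (List Int)) (out : List (Int × List Int)) : Prop := out = getMaxElementsRows_alt r c rows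
instance (r : Int) (c : Int) (rows : List (List Int)) (out : List (Int × List Int)) : Decidable (Spec_getMaxElementsRows r c rows out) := by unfold Spec_getMaxElementsRows; infer_instance

-- ===== CLAIM (what is proved, stated in full; the proofs are below) =====
def Claim_equal_getMaxElementsRows : Prop := ∀ (r : Int) (c : Int) (rows : List (List Int)), Dom_getMaxElementsRows r c rows → Pre_getMaxElementsRows r c rows → Spec_getMaxElementsRows r c rows (getMaxElementsRows r c rows)

-- ===== LEMMAS AND PROOFS =====

-- proof-side view of a row entry and of the running maximum of entries 0..k
def gD (row : List Int) (j : Nat) : Int := row.getD j 0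

def Nmax (row : List Int) : Nat → Int
  | 0 => gD row 0
  | k + 1 => max (Nmax row k) (gD row (k + 1))

theorem Nmax_isMax (row : List Int) (k : Nat) : ∀ j ≤ k, gD row j ≤ Nmax row k := by
  induction k with
  | zero => intro j hj; simp [Nat.le_zero.mp hj, Nmax]
  | succ k ih =>
    intro j hj
    rcases Nat.le_succ_iff.mp hj with h | h
    · exact le_trans (ih j h) (by simp [Nmax])
    · simp [h, Nmax]

theorem Nmax_attained (row : List Int) (k : Nat) : ∃ j ≤ k, gD row j = Nmax row k := by
  induction k with
  | zero => exact ⟨0, le_refl _, rfl⟩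
  | succ k ih =>
    rcases ih with ⟨j, hj, hje⟩
    rcases le_or_gt (gD row (k + 1)) (Nmax row k) with h | h
    · exact ⟨j, Nat.le_succ_of_le hj, by simp [Nmax, max_eq_left h, hje]⟩
    · exact ⟨k + 1, le_refl _, by simp [Nmax, max_eq_right (le_of_lt h)]⟩

theorem filter_head_pred (p : Nat → Bool) (k j : Nat) (hj : j < k) (hpj : p j = true) :
    p (((List.range k).filter p).headD 0) = true := by
  have hmem : j ∈ (List.range k).filter p := by
    simp [List.mem_filter, List.mem_range, hj, hpj]
  cases hfe : (List.range k).filter p with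
  | nil => rw [hfe] at hmem; simp at hmem
  | cons a t =>
    have : a ∈ (List.range k).filter p := by rw [hfe]; exact List.mem_cons_self
    have := List.of_mem_filter this
    simpa using this

-- A's inner loop invariant: after scanning columns 1..k-1 the state is exactly the
-- (ascending) indices below k holding the running maximum Nmax (k-1).
theorem innerA_inv (row : List Int) (k : Nat) (hk : 1 ≤ k) :
    (PySem.List.pyRange 1 (k : Int) 1).foldl (fun cur j =>
      if PySem.List.pyGetD row (cur.headD 0) 0 < PySem.List.pyGetD row j 0 then [j]
      else if PySem.List.pyGetD row (cur.headD 0) 0 == PySem.List.pyGetD row j 0 then cur ++ [j]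
      else cur) [0] =
    ((List.range k).filter (fun j => gD row j == Nmax row (k - 1))).map (fun j : Nat => (j : Int)) := by
  induction k, hk using Nat.le_induction with
  | base =>
    rw [PySem.List.pyRange_one_eq_nil (by norm_num)]
    simp [Nmax, gD]
  | succ k hk ih =>
    have hsplit : PySem.List.pyRange 1 ((k + 1 : Nat) : Int) 1
        = PySem.List.pyRange 1 (k : Int) 1 ++ [(k : Int)] := by
      push_cast
      exact PySem.List.pyRange_one_succ_right (by exact_mod_cast hk)
    rw [hsplit, List.foldl_append, ih]
    set p : Nat → Bool := fun j => gD row j == Nmax row (k - 1) with hp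
    have hhead : p (((List.range k).filter p).headD 0) = true := by
      rcases Nmax_attained row (k - 1) with ⟨j, hj, hje⟩
      have hjk : j < k := lt_of_le_of_lt hj (by omega)
      exact filter_head_pred p k j hjk (by simp [hp, hje])
    have hheadg : gD row (((List.range k).filter p).headD 0) = Nmax row (k - 1) := by
      simpa [hp] using hhead
    have hmapHead : ((((List.range k).filter p).map (fun j : Nat => (j : Int))).headD 0)
        = ((((List.range k).filter p).headD 0 : Nat) : Int) := by
      cases ((List.range k).filter p) <;> simp
    have hkk : k + 1 - 1 = k := by omega
    have hNk : Nmax row k = max (Nmax row (k - 1)) (gD row k) := by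
      cases k with
      | zero => omega
      | succ k' => simp [Nmax]
    simp only [List.foldl_cons, List.foldl_nil, hmapHead, PySem.List.pyGetD_natCast]
    have hgetHead : row.getD (((List.range k).filter p).headD 0) 0 = Nmax row (k - 1) := hheadg
    have hgetK : row.getD k 0 = gD row k := rfl
    rw [hgetHead, hgetK, hkk]
    rw [List.range_succ, List.filter_append]
    by_cases hlt : Nmax row (k - 1) < gD row k
    · have hmax : Nmax row k = gD row k := by rw [hNk]; exact max_eq_right (le_of_lt hlt)
      have hfk : (List.filter (fun j => gD row j == Nmax row k) [k]) = [k] := by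
        simp [hmax]
      have hfr : (List.range k).filter (fun j => gD row j == Nmax row k) = [] := by
        rw [List.filter_eq_nil_iff]
        intro j hj
        have : gD row j ≤ Nmax row (k - 1) := Nmax_isMax row (k - 1) j (by
          have := List.mem_range.mp hj; omega)
        simp; omega
      simp [hlt, hfk, hfr]
    · by_cases heq : Nmax row (k - 1) = gD row k
      · have hmax : Nmax row k = Nmax row (k - 1) := by rw [hNk]; omega
        have hfk : (List.filter (fun j => gD row j == Nmax row k) [k]) = [k] := by
          simp [hmax, heq]
        simp [heq, hmax, hp]
      · have hmax : Nmax row k = Nmax row (k - 1) := by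
          rw [hNk]; exact max_eq_left (by omega)
        have hfk : (List.filter (fun j => gD row j == Nmax row k) [k]) = [] := by
          simp [hmax]; omega
        simp [hlt, heq, hmax, hp]
        omega

-- B's max() equals the running maximum
theorem vals_eq (row : List Int) (n : Nat) :
    ((PySem.List.pyRange 0 (n : Int) 1).map (fun j => PySem.List.pyGetD row j 0))
      = (List.range n).map (fun j => gD row j) := by
  rw [PySem.List.pyRange_zero_natCast, List.map_map]
  simp [gD, Function.comp]

theorem rowB_max_eq (row : List Int) (n : Nat) (hn : 1 ≤ n) :
    ((PySem.List.max? ((PySem.List.pyRange 0 (n : Int) 1).map (fun j => PySem.List.pyGetD row j 0))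
      (fun x => x)).getD 0) = Nmax row (n - 1) := by
  rw [vals_eq]
  set vals := (List.range n).map (fun j => gD row j) with hv
  have hne : vals ≠ [] := by
    simp [hv]; omega
  obtain ⟨m, hm⟩ : ∃ m, PySem.List.max? vals (fun x => x) = some m := by
    cases h : PySem.List.max? vals (fun x => x) with
    | none => exact absurd ((PySem.List.max?_eq_none_iff vals (fun x => x)).mp h) hne
    | some m => exact ⟨m, rfl⟩
  rw [hm, Option.getD_some]
  have hmem := PySem.List.max?_mem hm
  obtain ⟨j, hj, hje⟩ : ∃ j, j < n ∧ gD row j = m := by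
    rcases List.mem_map.mp hmem with ⟨j, hj, hje⟩
    exact ⟨j, List.mem_range.mp hj, hje⟩
  apply le_antisymm
  · rw [← hje]
    exact Nmax_isMax row (n - 1) j (by omega)
  · rcases Nmax_attained row (n - 1) with ⟨j0, hj0, hj0e⟩
    have hj0mem : gD row j0 ∈ vals := by
      exact List.mem_map.mpr ⟨j0, List.mem_range.mpr (by omega), rfl⟩
    have := PySem.List.max?_isMax hm _ hj0mem
    simpa [hj0e] using this

theorem rowB_eq (row : List Int) (n : Nat) (hn : 1 ≤ n) :
    rowB row (n : Int) =
    ((List.range n).filter (fun j => gD row j == Nmax row (n - 1))).map (fun j : Nat => (j : Int)) := by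
  show (PySem.List.pyRange 0 (n : Int) 1).filter (fun j => PySem.List.pyGetD row j 0 ==
      (PySem.List.max? ((PySem.List.pyRange 0 (n : Int) 1).map (fun j => PySem.List.pyGetD row j 0))
        (fun x => x)).getD 0) = _
  rw [rowB_max_eq row n hn, PySem.List.pyRange_zero_natCast, List.filter_map]
  simp only [Function.comp_def, PySem.List.pyGetD_natCast]
  rfl

theorem row_eq (row : List Int) (c : Int) (hc : 1 ≤ c) :
    innerA row c = rowB row c := by
  have hn : c = ((c.toNat : Nat) : Int) := by omega
  have h1 : 1 ≤ c.toNat := by omega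
  rw [hn, innerA, innerA_inv row c.toNat h1, rowB_eq row c.toNat h1]

-- A's append-foldl builds the same list a map builds
theorem foldl_append_eq_map {α β : Type} (f : α → β) (l : List α) (acc : List β) :
    l.foldl (fun acc i => acc ++ [f i]) acc = acc ++ l.map f := by
  induction l generalizing acc with
  | nil => simp
  | cons a t ih => simp [List.foldl_cons, ih]

-- ===== VERDICT (by name: the statement is the Claim_ definition above) =====
theorem getMaxElementsRows_spec : Claim_equal_getMaxElementsRows := by
  intro r c rows _ hpre
  unfold Spec_getMaxElementsRows getMaxElementsRows getMaxElementsRows_alt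
  rw [foldl_append_eq_map]
  rcases hpre with hr | ⟨hc, hr, hrows⟩
  · rw [PySem.List.pyRange_one_eq_nil (by omega)]
    rfl
  · simp only [List.nil_append]
    exact List.map_congr_left (fun i _ => by rw [row_eq _ c hc])
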